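-- pv_equiv track=rewrite | github.com/mohsen-haddadi/Stuffs | EXTRA OLD CODES/FUNCTIONS_Str_Flush_Pairs with extra Functions to build (old).py | Table_flush_3_cards
-- ===== SOURCE A (Python) =====
-- def s(Card) :
--     if Card in ('A c','2 c','3 c','4 c','5 c','6 c','7 c','8 c','9 c','10 c','J c','Q c','K c') :
--         return "c"
--     if Card in ('A d','2 d','3 d','4 d','5 d','6 d','7 d','8 d','9 d','10 d','J d','Q d','K d') :
--         return "d"
--     if Card in ('A h','2 h','3 h','4 h','5 h','6 h','7 h','8 h','9 h','10 h','J h','Q h','K h') :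
--         return "h"
--     if Card in ('A s','2 s','3 s','4 s','5 s','6 s','7 s','8 s','9 s','10 s','J s','Q s','K s') :
--         return "s"
--
-- def Table_flush_3_cards( List ) :
--
--     c = 0; d = 0; h = 0; sp = 0
--     for i in List :
--         if s(i) == "c" : c = c + 1
--         if s(i) == "d" : d = d + 1
--         if s(i) == "h" : h = h + 1
--         if s(i) == "s" : sp = sp + 1
--
--     if 3 in (c,d,h,sp) :
--         return True
--     return False
-- ===== SOURCE B (Python) =====
-- RANKS = ['A', '2', '3', '4', '5', '6', '7', '8', '9', '10', 'J', 'Q', 'K']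
-- VALID = {r + ' ' + u for r in RANKS for u in 'cdhs'}
--
--
-- def _has_run_3(xs):
--     # xs is sorted, so equal suits are adjacent: check whether the leading
--     # run has length exactly 3, else recurse on the remainder.
--     if not xs:
--         return False
--     run = 0
--     while run < len(xs) and xs[run] == xs[0]:
--         run += 1
--     return run == 3 or _has_run_3(xs[run:])
--
--
-- def Table_flush_3_cards(List):
--     suits = sorted(card[-1] for card in List if card in VALID)
--     return _has_run_3(suits)
-- ===== Notes on version B (the rewrite author's own statement) =====
-- stated objective: faster
-- what changed: Replaces A's four scalar suit counters updated by four membership branches per card (each calling s(), which scans four 13-element tuples) with a sort-then-scan algorithm: extract each valid card's suit letter via one precomputed rank-by-suit set lookup, sort the letters so equal suits are adjacent, then recursively scan adjacent runs for one of length exactly 3.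
import Mathlib
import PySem

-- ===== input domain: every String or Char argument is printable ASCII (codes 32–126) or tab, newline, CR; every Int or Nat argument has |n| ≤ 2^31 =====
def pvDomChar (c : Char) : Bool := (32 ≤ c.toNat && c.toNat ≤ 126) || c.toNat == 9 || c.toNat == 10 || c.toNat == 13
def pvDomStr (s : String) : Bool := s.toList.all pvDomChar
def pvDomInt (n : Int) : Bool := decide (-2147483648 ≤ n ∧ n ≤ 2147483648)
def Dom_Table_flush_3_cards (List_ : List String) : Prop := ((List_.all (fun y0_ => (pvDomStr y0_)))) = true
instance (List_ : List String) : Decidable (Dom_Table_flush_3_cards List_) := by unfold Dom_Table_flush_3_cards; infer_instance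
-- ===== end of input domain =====

-- B replaces A's four scalar suit counters by a sort-then-scan algorithm: extract the suit letter of
-- each valid card (validity via a precomputed rank×suit set), sort the letters so equal suits are
-- adjacent, and scan for a run of length exactly 3 (objective: alternative).

-- ===== PORT A =====
def sA (Card : String) : Option String :=
  if Card ∈ ["A c","2 c","3 c","4 c","5 c","6 c","7 c","8 c","9 c","10 c","J c","Q c","K c"] then some "c"
  else if Card ∈ ["A d","2 d","3 d","4 d","5 d","6 d","7 d","8 d","9 d","10 d","J d","Q d","K d"] then some "d"
  else if Card ∈ ["A h","2 h","3 h","4 h","5 h","6 h","7 h","8 h","9 h","10 h","J h","Q h","K h"] then some "h"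
  else if Card ∈ ["A s","2 s","3 s","4 s","5 s","6 s","7 s","8 s","9 s","10 s","J s","Q s","K s"] then some "s"
  else none   -- Python's implicit 'return None'

def Table_flush_3_cards (List_ : List String) : Bool :=
  let st := List_.foldl (fun (acc : Int × Int × Int × Int) i =>
      let c := if sA i == some "c" then acc.1 + 1 else acc.1
      let d := if sA i == some "d" then acc.2.1 + 1 else acc.2.1
      let h := if sA i == some "h" then acc.2.2.1 + 1 else acc.2.2.1
      let sp := if sA i == some "s" then acc.2.2.2 + 1 else acc.2.2.2
      (c, d, h, sp)) (0, 0, 0, 0)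
  if st.1 = 3 ∨ st.2.1 = 3 ∨ st.2.2.1 = 3 ∨ st.2.2.2 = 3 then true else false

-- ===== PORT B =====
def pvRanks : List String := ["A","2","3","4","5","6","7","8","9","10","J","Q","K"]
-- {r + ' ' + u for r in RANKS for u in 'cdhs'}
def pvValid : PySem.Set String :=
  PySem.Set.ofList (pvRanks.flatMap (fun r => "cdhs".toList.map (fun u => r ++ " " ++ String.singleton u)))

-- _has_run_3: the while loop counts run = length of the equal head prefix (takeWhile), and
-- xs[run:] on the nonempty list x :: t is t.drop (run - 1); exact transcription of Source B's recursion.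
def pvHasRun3 : List Char → Bool
  | [] => false
  | x :: t =>
    let run := (t.takeWhile (fun y => y == x)).length + 1
    run == 3 || pvHasRun3 (t.drop (run - 1))
termination_by l => l.length
decreasing_by simp

def Table_flush_3_cards_alt (List_ : List String) : Bool :=
  -- card[-1] is taken only for cards in pvValid, all of which are nonempty, so pyGet? is exact here
  let suits := PySem.List.sorted
      (List_.filterMap (fun card =>
        if PySem.Set.contains pvValid card then PySem.Str.pyGet? card (-1) else none))
      (fun c => c) false
  pvHasRun3 suits

-- ===== PRECONDITION & SPEC =====
def Spec_Table_flush_3_cards (List_ : List String) (out : Bool) : Prop := out = Table_flush_3_cards_alt List_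
instance (List_ : List String) (out : Bool) : Decidable (Spec_Table_flush_3_cards List_ out) := by unfold Spec_Table_flush_3_cards; infer_instance

-- ===== CLAIM (what is proved, stated in full; the proofs are below) =====
def Claim_equal_Table_flush_3_cards : Prop := ∀ (List_ : List String), Dom_Table_flush_3_cards List_ → Spec_Table_flush_3_cards List_ (Table_flush_3_cards List_)

-- ===== LEMMAS AND PROOFS =====

-- B's per-card suit extraction, named for the proofs (definitionally B's filterMap body)
def pvSuitOf (card : String) : Option Char :=
  if PySem.Set.contains pvValid card then PySem.Str.pyGet? card (-1) else none

-- pointwise bridge: A's helper s() agrees with B's set-membership + last-character extraction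
set_option maxRecDepth 40000 in
theorem sA_eq_suitOf (card : String) :
    sA card = (pvSuitOf card).map (fun ch => String.singleton ch) := by
  by_cases hv : PySem.Set.contains pvValid card = true
  · have hm : card ∈ (pvValid : List String) := by
      simpa [List.contains_iff_mem] using hv
    revert hm
    have : ∀ y ∈ (pvValid : List String), sA y = (pvSuitOf y).map (fun ch => String.singleton ch) := by
      decide
    exact this card
  · have hm : card ∉ (pvValid : List String) := by
      simpa [List.contains_iff_mem] using hv
    have hc : card ∉ ["A c","2 c","3 c","4 c","5 c","6 c","7 c","8 c","9 c","10 c","J c","Q c","K c"] := by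
      intro h; exact hm ((by decide : ∀ y ∈ ["A c","2 c","3 c","4 c","5 c","6 c","7 c","8 c","9 c","10 c","J c","Q c","K c"], y ∈ (pvValid : List String)) card h)
    have hd : card ∉ ["A d","2 d","3 d","4 d","5 d","6 d","7 d","8 d","9 d","10 d","J d","Q d","K d"] := by
      intro h; exact hm ((by decide : ∀ y ∈ ["A d","2 d","3 d","4 d","5 d","6 d","7 d","8 d","9 d","10 d","J d","Q d","K d"], y ∈ (pvValid : List String)) card h)
    have hh : card ∉ ["A h","2 h","3 h","4 h","5 h","6 h","7 h","8 h","9 h","10 h","J h","Q h","K h"] := by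
      intro h; exact hm ((by decide : ∀ y ∈ ["A h","2 h","3 h","4 h","5 h","6 h","7 h","8 h","9 h","10 h","J h","Q h","K h"], y ∈ (pvValid : List String)) card h)
    have hs : card ∉ ["A s","2 s","3 s","4 s","5 s","6 s","7 s","8 s","9 s","10 s","J s","Q s","K s"] := by
      intro h; exact hm ((by decide : ∀ y ∈ ["A s","2 s","3 s","4 s","5 s","6 s","7 s","8 s","9 s","10 s","J s","Q s","K s"], y ∈ (pvValid : List String)) card h)
    unfold pvSuitOf
    rw [if_neg hv]
    simp [sA, hc, hd, hh, hs]

-- every suit letter B extracts is one of the four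
set_option maxRecDepth 40000 in
theorem suitOf_cases (card : String) {ch : Char} (h : pvSuitOf card = some ch) :
    ch = 'c' ∨ ch = 'd' ∨ ch = 'h' ∨ ch = 's' := by
  unfold pvSuitOf at h
  split at h
  · rename_i hv
    have hm : card ∈ (pvValid : List String) := by
      simpa [List.contains_iff_mem] using hv
    have h4 : ∀ y ∈ (pvValid : List String),
        PySem.Str.pyGet? y (-1) = some 'c' ∨ PySem.Str.pyGet? y (-1) = some 'd' ∨
        PySem.Str.pyGet? y (-1) = some 'h' ∨ PySem.Str.pyGet? y (-1) = some 's' := by decide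
    rcases h4 card hm with h'|h'|h'|h' <;> rw [h'] at h
    · exact Or.inl (Option.some_inj.mp h).symm
    · exact Or.inr (Or.inl (Option.some_inj.mp h).symm)
    · exact Or.inr (Or.inr (Or.inl (Option.some_inj.mp h).symm))
    · exact Or.inr (Or.inr (Or.inr (Option.some_inj.mp h).symm))
  · exact absurd h (by simp)

-- loop invariant: A's four counters are the tallies of B's extracted suit letters
theorem foldA_inv (l : List String) (c d h sp : Int) :
    l.foldl (fun (acc : Int × Int × Int × Int) i =>
      let c := if sA i == some "c" then acc.1 + 1 else acc.1
      let d := if sA i == some "d" then acc.2.1 + 1 else acc.2.1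
      let h := if sA i == some "h" then acc.2.2.1 + 1 else acc.2.2.1
      let sp := if sA i == some "s" then acc.2.2.2 + 1 else acc.2.2.2
      (c, d, h, sp)) (c, d, h, sp)
    = (c + ((l.filterMap pvSuitOf).count 'c' : Int),
       d + ((l.filterMap pvSuitOf).count 'd' : Int),
       h + ((l.filterMap pvSuitOf).count 'h' : Int),
       sp + ((l.filterMap pvSuitOf).count 's' : Int)) := by
  induction l generalizing c d h sp with
  | nil => simp
  | cons x t ih =>
    rw [List.foldl_cons, ih]
    have hsx := sA_eq_suitOf x
    rcases hx : pvSuitOf x with _ | ch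
    · rw [hx] at hsx
      simp only [Option.map_none] at hsx
      simp [hsx, hx]
    · rw [hx] at hsx
      simp only [Option.map_some] at hsx
      rcases suitOf_cases x hx with rfl|rfl|rfl|rfl <;>
        simp [hsx, hx, String.singleton] <;> omega

-- run-scan on a sorted list finds exactly the suits with multiplicity 3
theorem hasRun3_iff_count (n : Nat) :
    ∀ l : List Char, l.length ≤ n → l.Pairwise (· ≤ ·) →
      (pvHasRun3 l = true ↔ ∃ x ∈ l, l.count x = 3) := by
  induction n with
  | zero =>
    intro l hl _
    have : l = [] := List.eq_nil_of_length_eq_zero (Nat.le_zero.mp hl)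
    subst this; rw [pvHasRun3]; simp
  | succ n ih =>
    intro l hl hp
    match l with
    | [] => rw [pvHasRun3]; simp
    | x :: t =>
      have hx_le : ∀ y ∈ t, x ≤ y := fun y hy => List.rel_of_pairwise_cons hp hy
      have hpt : t.Pairwise (· ≤ ·) := hp.of_cons
      set p := t.takeWhile (fun y => y == x) with hpdef
      set r := t.dropWhile (fun y => y == x) with hrdef
      have htpr : p ++ r = t := List.takeWhile_append_dropWhile
      have hdrop : t.drop p.length = r := by
        conv_lhs => rw [← htpr]
        exact List.drop_left
      have hpx : ∀ y ∈ p, y = x := by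
        intro y hy
        have := List.mem_takeWhile_imp hy
        simpa using this
      -- every element of r is > x
      have hrx : ∀ z ∈ r, x < z := by
        intro z hz
        have hzt : z ∈ t := by rw [← htpr]; exact List.mem_append_right p hz
        have hle : x ≤ z := hx_le z hzt
        rcases hr : r with _ | ⟨y, r'⟩
        · rw [hr] at hz; cases hz
        · have hy_ne : ¬ (y == x) = true := by
            have := List.head?_dropWhile_not (fun y => y == x) t
            rw [← hrdef, hr] at this
            simpa using this
          have hy_ne' : y ≠ x := by simpa using hy_ne
          have hyt : y ∈ t := by
            rw [← htpr, hr]; exact List.mem_append_right p (List.mem_cons_self)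
          have hxy : x < y := lt_of_le_of_ne (hx_le y hyt) (Ne.symm hy_ne')
          rw [hr] at hz
          rcases List.mem_cons.mp hz with rfl | hz'
          · exact hxy
          · have hrp : r.Pairwise (· ≤ ·) := hpt.sublist (List.dropWhile_sublist _)
            have : y ≤ z := by
              rw [hr] at hrp
              exact List.rel_of_pairwise_cons hrp hz'
            exact lt_of_lt_of_le hxy this
      have hcount_x_r : r.count x = 0 := by
        rw [List.count_eq_zero]
        intro hxr
        exact absurd (hrx x hxr) (lt_irrefl x)
      have hcount_x_p : p.count x = p.length := by
        rw [List.count_eq_length]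
        intro y hy; exact (hpx y hy).symm
      have hcount_x : (x :: t).count x = p.length + 1 := by
        rw [List.count_cons_self, ← htpr, List.count_append, hcount_x_p, hcount_x_r]
      have hcount_ne : ∀ z, z ≠ x → (x :: t).count z = r.count z := by
        intro z hz
        have hcp : p.count z = 0 := by
          rw [List.count_eq_zero]
          intro hzp; exact hz (hpx z hzp)
        have h1 : (x :: t).count z = t.count z := by
          rw [List.count_cons]; simp [Ne.symm hz]
        rw [h1, ← htpr, List.count_append, hcp]
        omega
      have hrlen : r.length ≤ n := by
        have h1 : r.length ≤ t.length := (List.dropWhile_sublist _).length_le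
        have h2 : t.length ≤ n := by simpa using Nat.lt_succ_iff.mp (Nat.lt_of_lt_of_le (by simp) hl)
        omega
      have hrp : r.Pairwise (· ≤ ·) := hpt.sublist (List.dropWhile_sublist _)
      have ihr := ih r hrlen hrp
      have hunf : pvHasRun3 (x :: t) = ((p.length + 1 == 3) || pvHasRun3 r) := by
        rw [pvHasRun3]
        simp only [← hpdef, Nat.add_sub_cancel, hdrop]
      rw [hunf]
      constructor
      · intro hB
        rcases Bool.or_eq_true_iff.mp hB with h3 | hrec
        · refine ⟨x, List.mem_cons_self, ?_⟩
          rw [hcount_x]; simpa using h3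
        · obtain ⟨z, hzr, hzc⟩ := ihr.mp hrec
          have hz_ne : z ≠ x := fun h => by
            rw [h] at hzc; rw [hcount_x_r] at hzc; omega
          refine ⟨z, ?_, ?_⟩
          · have : z ∈ t := by rw [← htpr]; exact List.mem_append_right p hzr
            exact List.mem_cons_of_mem x this
          · rw [hcount_ne z hz_ne]; exact hzc
      · rintro ⟨z, hz, hzc⟩
        by_cases hzx : z = x
        · subst hzx
          rw [hcount_x] at hzc
          exact Bool.or_eq_true_iff.mpr (Or.inl (by simpa using hzc))
        · have hzr : z ∈ r := by
            rcases List.mem_cons.mp hz with h | hzt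
            · exact absurd h hzx
            · rw [← htpr] at hzt
              rcases List.mem_append.mp hzt with hzp | hzr
              · exact absurd (hpx z hzp) hzx
              · exact hzr
          rw [hcount_ne z hzx] at hzc
          exact Bool.or_eq_true_iff.mpr (Or.inr (ihr.mpr ⟨z, hzr, hzc⟩))

theorem Table_flush_3_cards_spec : Claim_equal_Table_flush_3_cards := by
  intro List_ _
  unfold Spec_Table_flush_3_cards Table_flush_3_cards Table_flush_3_cards_alt
  rw [show (fun card => if PySem.Set.contains pvValid card then PySem.Str.pyGet? card (-1) else none) = pvSuitOf from rfl]
  rw [foldA_inv]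
  set l0 := List_.filterMap pvSuitOf with hl0
  set ls := PySem.List.sorted l0 (fun c => c) false with hls
  have hperm : ls.Perm l0 := PySem.List.sorted_perm l0 (fun c => c) false
  have hpair : ls.Pairwise (· ≤ ·) := by
    simpa using (PySem.List.sorted_pairwise (xs := l0) (key := fun c => c))
  have hcnt : ∀ ch : Char, ls.count ch = l0.count ch := fun ch => hperm.count_eq ch
  have hiff := hasRun3_iff_count ls.length ls le_rfl hpair
  dsimp only
  split
  · rename_i hP
    symm
    apply hiff.mpr
    rcases hP with h|h|h|h
    · exact ⟨'c', hperm.mem_iff.mpr (List.count_pos_iff.mp (by omega)), by rw [hcnt]; omega⟩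
    · exact ⟨'d', hperm.mem_iff.mpr (List.count_pos_iff.mp (by omega)), by rw [hcnt]; omega⟩
    · exact ⟨'h', hperm.mem_iff.mpr (List.count_pos_iff.mp (by omega)), by rw [hcnt]; omega⟩
    · exact ⟨'s', hperm.mem_iff.mpr (List.count_pos_iff.mp (by omega)), by rw [hcnt]; omega⟩
  · rename_i hP
    symm
    rw [Bool.eq_false_iff]
    intro hB
    obtain ⟨z, hzl, hzc⟩ := hiff.mp hB
    obtain ⟨card, _, hcard⟩ := List.mem_filterMap.mp (hperm.mem_iff.mp hzl)
    rw [hcnt] at hzc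
    apply hP
    rcases suitOf_cases card hcard with rfl|rfl|rfl|rfl
    · left; omega
    · right; left; omega
    · right; right; left; omega
    · right; right; right; omega
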